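-- pv_equiv track=rewrite | github.com/gbowdler/bromyard-hub | scripts/generate_packing_sheet.py | build_comments
-- ===== SOURCE A (Python) =====
-- _CLIP_SIZE  = {"2BC": 2, "3BC": 3, "4BC": 4}
--
-- _CLIP_LABEL = {"2BC": "2 BALE CLIP", "3BC": "3 BALE CLIP", "4BC": "4 BALE CLIP"}
--
-- def build_comments(rows):
--     """
--     Add 'comments' field to each row.
--
--     Singles are blank. First bale of a clip gets full label ("2 BALE CLIP" etc.),
--     subsequent bales in the same clip get a ditto mark.
--     """
--     result = []
--     i = 0
--     while i < len(rows):
--         btype = rows[i]["type"]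
--         if btype == "Single":
--             result.append({**rows[i], "comments": ""})
--             i += 1
--         else:
--             size  = _CLIP_SIZE.get(btype, 1)
--             label = _CLIP_LABEL.get(btype, btype)
--             for j in range(size):
--                 if i + j < len(rows):
--                     result.append({**rows[i + j], "comments": label if j == 0 else '"'})
--             i += size
--     return result
-- ===== SOURCE B (Python) =====
-- _CLIP_SIZE  = {"2BC": 2, "3BC": 3, "4BC": 4}
--
-- _CLIP_LABEL = {"2BC": "2 BALE CLIP", "3BC": "3 BALE CLIP", "4BC": "4 BALE CLIP"}
--
-- def build_comments(rows):
--     """Single pass: a 'remaining' counter marks how many upcoming rows are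
--     inside the current clip and get ditto marks."""
--     result = []
--     remaining = 0
--     for row in rows:
--         if remaining > 0:
--             result.append({**row, "comments": '"'})
--             remaining -= 1
--         else:
--             t = row["type"]
--             if t == "Single":
--                 result.append({**row, "comments": ""})
--             else:
--                 result.append({**row, "comments": _CLIP_LABEL.get(t, t)})
--                 remaining = _CLIP_SIZE.get(t, 1) - 1
--     return result
-- ===== Notes on version B (the rewrite author's own statement) =====
-- stated objective: simpler
-- what changed: Replaces A's index-driven while-loop with a nested for-loop over range(size) by a single flat for-loop over the rows that carries a 'remaining' ditto counter, so clip membership is tracked by state instead of index arithmetic.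
import Mathlib
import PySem

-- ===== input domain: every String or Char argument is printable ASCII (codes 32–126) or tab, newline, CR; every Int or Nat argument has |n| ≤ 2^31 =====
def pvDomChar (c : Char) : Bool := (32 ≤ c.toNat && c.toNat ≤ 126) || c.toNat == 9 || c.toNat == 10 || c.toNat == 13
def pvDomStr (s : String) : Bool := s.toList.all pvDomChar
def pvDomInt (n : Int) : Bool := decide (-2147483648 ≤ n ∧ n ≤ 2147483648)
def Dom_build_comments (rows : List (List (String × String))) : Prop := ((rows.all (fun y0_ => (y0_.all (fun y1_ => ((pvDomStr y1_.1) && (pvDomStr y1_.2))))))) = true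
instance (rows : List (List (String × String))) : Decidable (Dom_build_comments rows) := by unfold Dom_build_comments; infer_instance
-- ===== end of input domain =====

-- B replaces A's index-driven while-loop (with a nested for over range(size)) by a single
-- flat pass over the rows carrying a 'remaining' ditto counter; return values agree on Pre_.

-- ===== PORT A =====
-- shared module constants: the dicts _CLIP_SIZE and _CLIP_LABEL
def pvClipSize : PySem.Dict String Int := PySem.Dict.ofList [("2BC", 2), ("3BC", 3), ("4BC", 4)]
def pvClipLabel : PySem.Dict String String := PySem.Dict.ofList [("2BC", "2 BALE CLIP"), ("3BC", "3 BALE CLIP"), ("4BC", "4 BALE CLIP")]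

-- {**row, "comments": v} where row (given as an assoc list) is a Python dict
def pvRowWith (row : List (String × String)) (v : String) : List (String × String) :=
  ((PySem.Dict.ofList row).insert "comments" v).items

-- size = _CLIP_SIZE.get(btype, 1); its value is in {1,2,3,4} so toNat is exact
def pvSize (btype : String) : Nat := (pvClipSize.getD btype 1).toNat

-- needed by the port's termination proof (cited in decreasing_by)
theorem pvSize_pos (btype : String) : 1 ≤ pvSize btype := by
  unfold pvSize pvClipSize
  simp only [PySem.Dict.ofList, PySem.Dict.getD_eq_get?_getD, PySem.Dict.update,
    PySem.Dict.get?_insert, List.foldl_cons, List.foldl_nil]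
  split_ifs <;> simp [PySem.Dict.get?, PySem.Dict.empty]

-- the while-loop of A: state = (result, i)
def buildA_go (rows : List (List (String × String))) (result : List (List (String × String))) (i : Nat) :
    List (List (String × String)) :=
  if _hlt : i < rows.length then
    match (PySem.Dict.ofList (rows.getD i [])).get? "type" with
    | none => result   -- Python raises KeyError here; excluded by Pre_build_comments
    | some btype =>
      if btype == "Single" then
        buildA_go rows (result ++ [pvRowWith (rows.getD i []) ""]) (i + 1)
      else
        let size := pvSize btype
        let label := pvClipLabel.getD btype btype
        let result2 := (List.range size).foldl
          (fun r j => if i + j < rows.length then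
              r ++ [pvRowWith (rows.getD (i + j) []) (if j = 0 then label else "\"")]
            else r) result
        buildA_go rows result2 (i + size)
  else result
termination_by rows.length - i
decreasing_by
  · omega
  · have := pvSize_pos btype; omega

def build_comments (rows : List (List (String × String))) : List (List (String × String)) :=
  buildA_go rows [] 0

-- ===== PORT B =====
-- B's loop body: state = (result, remaining)
def stepB (st : List (List (String × String)) × Nat) (row : List (String × String)) :
    List (List (String × String)) × Nat :=
  if st.2 > 0 then
    (st.1 ++ [pvRowWith row "\""], st.2 - 1)
  else
    match (PySem.Dict.ofList row).get? "type" with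
    | none => st   -- Python raises KeyError here; excluded by Pre_build_comments
    | some t =>
      if t == "Single" then (st.1 ++ [pvRowWith row ""], 0)
      else (st.1 ++ [pvRowWith row (pvClipLabel.getD t t)], pvSize t - 1)

-- single flat pass with a 'remaining' ditto counter
def build_comments_alt (rows : List (List (String × String))) : List (List (String × String)) :=
  (rows.foldl stepB ([], 0)).1

-- ===== PRECONDITION & SPEC =====
-- Pre_ excludes rows lacking a "type" key: when such a row starts a group, A (and B) raise
-- KeyError; a keyless row strictly inside a clip is never inspected and both programs
-- still return (the same value) there, so Pre_ is slightly narrower than A's exact domain.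
def Pre_build_comments (rows : List (List (String × String))) : Prop :=
  (rows.all (fun row => ((PySem.Dict.ofList row).get? "type").isSome)) = true
instance (rows : List (List (String × String))) : Decidable (Pre_build_comments rows) := by
  unfold Pre_build_comments; infer_instance

def pvWitness_build_comments : (List (List (String × String))) :=
  [[("type", "Single"), ("id", "1")], [("type", "2BC")], [("type", "XX")]]

def Spec_build_comments (rows : List (List (String × String))) (out : List (List (String × String))) : Prop := out = build_comments_alt rows
instance (rows : List (List (String × String))) (out : List (List (String × String))) : Decidable (Spec_build_comments rows out) := by unfold Spec_build_comments; infer_instance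

-- ===== CLAIM (what is proved, stated in full; the proofs are below) =====
def Claim_equal_build_comments : Prop := ∀ (rows : List (List (String × String))), Dom_build_comments rows → Pre_build_comments rows → Spec_build_comments rows (build_comments rows)

-- ===== LEMMAS AND PROOFS =====

-- recursive rendering of B's loop (proof skeleton)
def specB : List (List (String × String)) → Nat → List (List (String × String))
  | [], _ => []
  | row :: rest, rem =>
    if rem > 0 then pvRowWith row "\"" :: specB rest (rem - 1)
    else
      match (PySem.Dict.ofList row).get? "type" with
      | none => []
      | some t =>
        if t == "Single" then pvRowWith row "" :: specB rest 0
        else pvRowWith row (pvClipLabel.getD t t) :: specB rest (pvSize t - 1)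

theorem foldB_eq_specB (rows : List (List (String × String)))
    (hp : ∀ r ∈ rows, ((PySem.Dict.ofList r).get? "type").isSome) :
    ∀ (res : List (List (String × String))) (rem : Nat),
    (rows.foldl stepB (res, rem)).1 = res ++ specB rows rem := by
  induction rows with
  | nil => intro res rem; simp [specB]
  | cons row rest ih =>
    intro res rem
    have htail : ∀ r ∈ rest, ((PySem.Dict.ofList r).get? "type").isSome := by
      intro r hr; exact hp r (by simp [hr])
    obtain ⟨t, ht⟩ := Option.isSome_iff_exists.mp (hp row (by simp))
    rw [List.foldl_cons]
    by_cases hrem : rem > 0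
    · rw [show stepB (res, rem) row = (res ++ [pvRowWith row "\""], rem - 1) by
        simp [stepB, hrem]]
      rw [ih htail]
      simp [specB, hrem]
    · by_cases hsingle : t = "Single"
      · rw [show stepB (res, rem) row = (res ++ [pvRowWith row ""], 0) by
          simp [stepB, hrem, ht, hsingle]]
        rw [ih htail]
        simp [specB, hrem, ht, hsingle]
      · rw [show stepB (res, rem) row
            = (res ++ [pvRowWith row (pvClipLabel.getD t t)], pvSize t - 1) by
          simp [stepB, hrem, ht, hsingle]]
        rw [ih htail]
        simp [specB, hrem, ht, hsingle]

-- rows strictly inside a clip get ditto marks without their "type" being read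
theorem specB_ditto : ∀ (rem : Nat) (l : List (List (String × String))),
    specB l rem = (l.take rem).map (fun r => pvRowWith r "\"") ++ specB (l.drop rem) 0 := by
  intro rem
  induction rem with
  | zero => intro l; simp
  | succ k ih =>
    intro l
    cases l with
    | nil => simp [specB]
    | cons row rest => simp [specB, ih rest]

-- A's inner for-loop over range(k) starting at index i (all-ditto part)
theorem innerA_eq_map (rows : List (List (String × String)))
    (f : List (String × String) → List (String × String)) :
    ∀ (k i : Nat) (res : List (List (String × String))),
    (List.range k).foldl
      (fun r j => if i + j < rows.length then r ++ [f (rows.getD (i + j) [])] else r) res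
    = res ++ ((rows.drop i).take k).map f := by
  intro k
  induction k with
  | zero => intro i res; simp
  | succ k ih =>
    intro i res
    rw [List.range_succ, List.foldl_append, ih]
    simp only [List.foldl_cons, List.foldl_nil]
    by_cases h : i + k < rows.length
    · have h1 : (rows.drop i).take (k + 1)
          = (rows.drop i).take k ++ [rows[i + k]'h] := by
        rw [List.take_add_one]
        have hk : (rows.drop i)[k]? = some (rows[i + k]'h) := by
          rw [List.getElem?_drop]
          exact List.getElem?_eq_getElem h
        simp [hk]
      have h2 : rows.getD (i + k) [] = rows[i + k]'h := by
        simp [List.getD_eq_getElem?_getD, List.getElem?_eq_getElem h]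
      simp [h, h1]
    · have hlen : (rows.drop i).length ≤ k := by
        have : (rows.drop i).length = rows.length - i := by simp
        omega
      have h1 : (rows.drop i).take (k + 1) = (rows.drop i).take k := by
        rw [List.take_of_length_le hlen, List.take_of_length_le (Nat.le_succ_of_le hlen)]
      simp [h, h1]

-- main loop invariant: A's while-loop from index i produces specB of the remaining rows
theorem buildA_go_eq_specB (rows : List (List (String × String)))
    (hp : ∀ r ∈ rows, ((PySem.Dict.ofList r).get? "type").isSome) :
    ∀ (n i : Nat) (res : List (List (String × String))), rows.length - i ≤ n →
    buildA_go rows res i = res ++ specB (rows.drop i) 0 := by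
  intro n
  induction n with
  | zero =>
    intro i res hle
    have hnil : rows.drop i = [] := List.drop_eq_nil_of_le (by omega)
    rw [buildA_go, dif_neg (by omega : ¬ i < rows.length), hnil]
    simp [specB]
  | succ n ih =>
    intro i res hle
    by_cases hi : i < rows.length
    · have hdrop : rows.drop i = rows[i] :: rows.drop (i + 1) :=
        List.drop_eq_getElem_cons hi
      have hgetD : rows.getD i [] = rows[i] := by
        simp [List.getD_eq_getElem?_getD, List.getElem?_eq_getElem hi]
      obtain ⟨t, ht⟩ := Option.isSome_iff_exists.mp (hp rows[i] (List.getElem_mem hi))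
      rw [buildA_go]
      rw [dif_pos hi, hgetD, ht]
      by_cases hs : t = "Single"
      · simp only [hs, beq_self_eq_true, if_true]
        rw [ih (i + 1) _ (by omega), hdrop]
        simp [specB, ht, hs]
      · have hs' : (t == "Single") = false := by simp [hs]
        simp only [hs', Bool.false_eq_true, if_false]
        have hsize := pvSize_pos t
        -- peel off j = 0 (the labelled first bale) from range(size)
        rw [show pvSize t = (pvSize t - 1) + 1 by omega, List.range_succ_eq_map,
          List.foldl_cons, List.foldl_map]
        rw [if_pos (by omega : i + 0 < rows.length)]
        have hfun : (fun (r : List (List (String × String))) (j : Nat) =>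
            if i + (j + 1) < rows.length then
              r ++ [pvRowWith (rows.getD (i + (j + 1)) [])
                (if j + 1 = 0 then pvClipLabel.getD t t else "\"")]
            else r)
            = (fun r j => if (i + 1) + j < rows.length then
                r ++ [(fun row => pvRowWith row "\"") (rows.getD ((i + 1) + j) [])] else r) := by
          funext r j
          have : i + (j + 1) = (i + 1) + j := by omega
          simp [this]
        rw [hfun, innerA_eq_map rows (fun row => pvRowWith row "\"")]
        rw [ih (i + ((pvSize t - 1) + 1)) _ (by omega)]
        rw [hdrop]
        simp only [specB, gt_iff_lt, Nat.lt_irrefl, ht, hs',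
          Bool.false_eq_true, if_false]
        rw [specB_ditto (pvSize t - 1) (rows.drop (i + 1))]
        rw [List.drop_drop]
        have heq : i + 1 + (pvSize t - 1) = i + (pvSize t - 1 + 1) := by omega
        simp [heq, List.getD_eq_getElem?_getD, List.getElem?_eq_getElem hi]
    · have hnil : rows.drop i = [] := List.drop_eq_nil_of_le (by omega)
      rw [buildA_go, dif_neg hi, hnil]
      simp [specB]

-- ===== VERDICT (by name: the statement is the Claim_ definition above) =====
theorem build_comments_spec : Claim_equal_build_comments := by
  intro rows _ hpre
  unfold Spec_build_comments build_comments build_comments_alt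
  have hp : ∀ r ∈ rows, ((PySem.Dict.ofList r).get? "type").isSome := by
    intro r hr
    have := (List.all_eq_true.mp hpre) r hr
    simpa using this
  rw [foldB_eq_specB rows hp [] 0, buildA_go_eq_specB rows hp rows.length 0 [] (by omega)]
  simp
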